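-- pv_equiv track=rewrite | github.com/aaatipamula/210_assignments | AnikethAatipamula_Assignment3/AnikethAatipamula_Assignment3.py | rComposition
-- ===== SOURCE A (Python) =====
-- Relation = set[tuple[int, int]]
--
-- def rComposition(S: Relation, R: Relation) -> Relation:
--     # Create a map of all the values of the "inbetween" set to the end set
--     hashmap = {}
--     for key, val in S:
--         # If a key is mapped to a value add it to the list of possible values
--         if key in hashmap:
--             hashmap.get(key, []).append(val)
--         # Map a key to a value if not already mapped.
--         else:
--             hashmap[key] = [val]
--
--     # Create a new relation and all all the possible key value pairs
--     newRelation: Relation = set()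
--     for key, val in R:
--         vals = hashmap.get(val, []) # Get a value from the map
--         for val in vals:
--             newRelation.add((key, val)) # Add a new "point" to the final relation
--
--     return newRelation
-- ===== SOURCE B (Python) =====
-- def rComposition(S, R):
--     # Direct nested scan: no index is built; for each (a, b) in R we re-scan S
--     # for pairs (c, d) with c == b and collect (a, d).
--     return {(a, d) for (a, b) in R for (c, d) in S if b == c}
-- ===== Notes on version B (the rewrite author's own statement) =====
-- stated objective: idiomatic
-- what changed: Replaces A's build-hashmap-then-join (index S by first coordinate, then look up each R pair) with a one-line set comprehension doing a direct nested scan of R and S, maintaining no index.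
import Mathlib
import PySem

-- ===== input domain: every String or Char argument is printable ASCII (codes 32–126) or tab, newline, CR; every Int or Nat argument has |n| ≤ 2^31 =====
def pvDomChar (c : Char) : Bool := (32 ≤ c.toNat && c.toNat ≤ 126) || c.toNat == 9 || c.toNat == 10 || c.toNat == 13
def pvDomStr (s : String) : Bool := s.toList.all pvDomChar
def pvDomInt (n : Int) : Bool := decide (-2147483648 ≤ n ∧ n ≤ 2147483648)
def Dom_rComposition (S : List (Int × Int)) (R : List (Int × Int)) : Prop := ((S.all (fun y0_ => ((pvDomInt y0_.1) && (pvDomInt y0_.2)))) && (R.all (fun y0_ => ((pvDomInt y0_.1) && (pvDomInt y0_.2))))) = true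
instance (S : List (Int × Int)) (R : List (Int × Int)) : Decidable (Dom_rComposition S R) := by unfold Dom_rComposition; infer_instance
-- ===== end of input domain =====

-- B drops A's hashmap index and computes the composition by a direct nested scan (set comprehension);
-- same return value, different traversal strategy.

-- ===== PORT A =====
-- hashmap build loop: if key in hashmap, append val to its list (in-place), else map key to [val]
def pvBuildA (S : List (Int × Int)) : PySem.Dict Int (List Int) :=
  S.foldl (fun hashmap kv =>
    if hashmap.contains kv.1 then hashmap.modify kv.1 [] (fun l => l ++ [kv.2])
    else hashmap.insert kv.1 [kv.2]) PySem.Dict.empty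

def rComposition (S : List (Int × Int)) (R : List (Int × Int)) : List (Int × Int) :=
  let hashmap := pvBuildA S
  R.foldl (fun newRelation kv =>
    (hashmap.getD kv.2 []).foldl (fun newRelation v => PySem.Set.add newRelation (kv.1, v)) newRelation)
    PySem.Set.empty

-- ===== PORT B =====
-- {(a, d) for (a, b) in R for (c, d) in S if b == c}
def rComposition_alt (S : List (Int × Int)) (R : List (Int × Int)) : List (Int × Int) :=
  R.foldl (fun acc ab =>
    S.foldl (fun acc cd => if ab.2 == cd.1 then PySem.Set.add acc (ab.1, cd.2) else acc) acc)
    PySem.Set.empty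

-- ===== PRECONDITION & SPEC =====
def Spec_rComposition (S : List (Int × Int)) (R : List (Int × Int)) (out : List (Int × Int)) : Prop := out = rComposition_alt S R
instance (S : List (Int × Int)) (R : List (Int × Int)) (out : List (Int × Int)) : Decidable (Spec_rComposition S R out) := by unfold Spec_rComposition; infer_instance

-- ===== CLAIM (what is proved, stated in full; the proofs are below) =====
def Claim_equal_rComposition : Prop := ∀ (S : List (Int × Int)) (R : List (Int × Int)), Dom_rComposition S R → Spec_rComposition S R (rComposition S R)

-- ===== LEMMAS AND PROOFS =====

-- A's build step is exactly Dict.modify (insert-with-[val] on a fresh key IS modify with default [])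
lemma pvBuildA_step (d : PySem.Dict Int (List Int)) (kv : Int × Int) :
    (if d.contains kv.1 then d.modify kv.1 [] (fun l => l ++ [kv.2])
     else d.insert kv.1 [kv.2]) = d.modify kv.1 [] (fun l => l ++ [kv.2]) := by
  by_cases h : d.contains kv.1
  · simp [h]
  · simp only [Bool.not_eq_true] at h
    simp [h, PySem.Dict.modify, PySem.Dict.getD_of_not_contains d [] h]

-- the hashmap groups S's second coordinates by first coordinate, in S order
lemma pvBuildA_getD (S : List (Int × Int)) (c : Int) :
    (pvBuildA S).getD c [] = (S.filter (fun p => p.1 == c)).map (·.2) := by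
  unfold pvBuildA
  rw [PySem.List.foldl_congr_mem S _ _ PySem.Dict.empty (fun d kv _ => pvBuildA_step d kv),
      PySem.Dict.getD_foldl_modify_append]
  simp

-- A's inner loop over the grouped values equals B's filtered scan of S
lemma pvInner_eq (S : List (Int × Int)) (ab : Int × Int) (acc : List (Int × Int)) :
    ((pvBuildA S).getD ab.2 []).foldl
        (fun ns v => PySem.Set.add ns (ab.1, v)) acc
      = S.foldl (fun acc cd => if ab.2 == cd.1 then PySem.Set.add acc (ab.1, cd.2) else acc) acc := by
  rw [pvBuildA_getD, List.foldl_map, List.foldl_filter]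
  apply PySem.List.foldl_congr_mem
  intro a p _
  by_cases h : p.1 = ab.2 <;> simp [h, beq_iff_eq]
  exact fun hh => absurd hh.symm h

-- ===== VERDICT (by name: the statement is the Claim_ definition above) =====
theorem rComposition_spec : Claim_equal_rComposition := by
  intro S R _
  unfold Spec_rComposition rComposition rComposition_alt
  exact PySem.List.foldl_congr_mem _ _ _ _ (fun acc ab _ => pvInner_eq S ab acc)
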